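-- pv_equiv track=rewrite | github.com/amde-et/competitive-programming | week1/check-if-number-is-a-sum-of-powers-of-three.py | checkPowersOfThree
-- ===== SOURCE A (Python) =====
-- def checkPowersOfThree(n: int) -> bool:
--     sm=0
--     val=16
--     while val>=0:
--         tmp=3**val
--         if sm+tmp<n:
--             sm+=tmp
--         elif sm+tmp==n:return True
--         val-=1
--     return False
-- ===== SOURCE B (Python) =====
-- def checkPowersOfThree(n: int) -> bool:
--     if n <= 0:
--         return False
--     for _ in range(17):
--         if n % 3 == 2:
--             return False
--         n //= 3
--     return n == 0
-- ===== Notes on version B (the rewrite author's own statement) =====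
-- stated objective: idiomatic
-- what changed: Replaced the greedy top-down accumulation over a table of powers 3^16..3^0 with a direct base-3 digit scan (17 iterations of n%3 / n//=3, failing on a digit 2, then checking the quotient is 0).
import Mathlib
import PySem

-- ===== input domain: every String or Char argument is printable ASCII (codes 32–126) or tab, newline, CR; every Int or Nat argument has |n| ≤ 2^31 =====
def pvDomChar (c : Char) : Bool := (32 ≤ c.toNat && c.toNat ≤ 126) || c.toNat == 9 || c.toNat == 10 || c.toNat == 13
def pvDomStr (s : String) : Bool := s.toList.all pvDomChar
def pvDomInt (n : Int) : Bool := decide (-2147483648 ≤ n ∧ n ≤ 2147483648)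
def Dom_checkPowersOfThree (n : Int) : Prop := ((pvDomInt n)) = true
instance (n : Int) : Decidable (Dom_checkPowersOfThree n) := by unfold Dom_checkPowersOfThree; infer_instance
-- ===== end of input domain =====

-- B replaces A's greedy accumulation over the powers 3^16..3^0 with a direct base-3 digit
-- scan (fail on a digit 2, succeed iff 17 digits exhaust a positive n): idiomatic, not faster.


-- ===== PORT A =====
-- A's while-loop: val runs 16,15,…,0; here the fuel k is val+1 (k = 0 ↔ val < 0, loop exit).
def checkPowersOfThreeGo (n : Int) : Nat → Int → Bool
  | 0, _ => false
  | k + 1, sm =>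
    let tmp : Int := 3 ^ k
    if sm + tmp < n then checkPowersOfThreeGo n k (sm + tmp)
    else if sm + tmp = n then true
    else checkPowersOfThreeGo n k sm

def checkPowersOfThree (n : Int) : Bool := checkPowersOfThreeGo n 17 0

-- ===== PORT B =====
-- B's for-loop over range(17): k iterations remain; at the end, return n == 0.
def checkPowersOfThreeAltGo : Nat → Int → Bool
  | 0, n => n == 0
  | k + 1, n => if PySem.Int.mod n 3 == 2 then false else checkPowersOfThreeAltGo k (PySem.Int.floordiv n 3)

def checkPowersOfThree_alt (n : Int) : Bool :=
  if n ≤ 0 then false else checkPowersOfThreeAltGo 17 n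

-- ===== PRECONDITION & SPEC =====
def Spec_checkPowersOfThree (n : Int) (out : Bool) : Prop := out = checkPowersOfThree_alt n
instance (n : Int) (out : Bool) : Decidable (Spec_checkPowersOfThree n out) := by unfold Spec_checkPowersOfThree; infer_instance

-- ===== CLAIM (what is proved, stated in full; the proofs are below) =====
def Claim_equal_checkPowersOfThree : Prop := ∀ (n : Int), Dom_checkPowersOfThree n → Spec_checkPowersOfThree n (checkPowersOfThree n)

-- ===== LEMMAS AND PROOFS =====

-- A, rephrased on the remainder r = n - sm: at fuel k+1 (exponent k), take 3^k when it is
-- smaller than the remainder, succeed when it equals it.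
def grRem : Nat → Int → Bool
  | 0, _ => false
  | k + 1, r =>
    if (3:Int) ^ k < r then grRem k (r - 3 ^ k)
    else if (3:Int) ^ k = r then true
    else grRem k r

lemma checkPowersOfThreeGo_eq_grRem (n : Int) : ∀ (k : Nat) (sm : Int),
    checkPowersOfThreeGo n k sm = grRem k (n - sm) := by
  intro k
  induction k with
  | zero => intro sm; rfl
  | succ k ih =>
    intro sm
    simp only [checkPowersOfThreeGo, grRem]
    by_cases h : sm + 3 ^ k < n
    · rw [if_pos h, if_pos (by omega : (3:Int) ^ k < n - sm), ih]
      congr 1; ring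
    · rw [if_neg h, if_neg (by omega : ¬ ((3:Int) ^ k < n - sm))]
      by_cases he : sm + 3 ^ k = n
      · rw [if_pos he, if_pos (by omega : (3:Int) ^ k = n - sm)]
      · rw [if_neg he, if_neg (by omega : ¬ ((3:Int) ^ k = n - sm)), ih]

-- the digit characterisation both loops are proved equal to
def DigitsOk (k : Nat) (r : Int) : Prop :=
  0 < r ∧ r < 3 ^ (k + 1) ∧ ∀ i : Nat, i ≤ k → r / 3 ^ i % 3 ≠ 2

-- dividing out 3^i (i ≤ k) from 3^(k+1) + r' leaves the digit untouched
lemma topdigit_div (k i : Nat) (hik : i ≤ k) (r' : Int) :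
    ((3:Int) ^ (k+1) + r') / 3 ^ i % 3 = r' / 3 ^ i % 3 := by
  have hpow : (3:Int) ^ (k+1) = 3 ^ (k-i) * 3 * 3 ^ i := by
    rw [mul_assoc, ← pow_succ']
    rw [← pow_add]
    congr 1
    omega
  rw [hpow, add_comm, Int.add_mul_ediv_right _ _ (pow_ne_zero i (by norm_num : (3:Int) ≠ 0))]
  omega

lemma topdigit_top (k : Nat) (r' : Int) (h0 : 0 ≤ r') (hlt : r' < 3 ^ (k+1)) :
    ((3:Int) ^ (k+1) + r') / 3 ^ (k+1) = 1 := by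
  have h1 : (3:Int) ^ (k+1) + r' = r' + 1 * 3 ^ (k+1) := by ring
  rw [h1, Int.add_mul_ediv_right _ _ (pow_ne_zero (k+1) (by norm_num : (3:Int) ≠ 0))]
  rw [Int.ediv_eq_zero_of_lt h0 hlt]
  norm_num

lemma digitsOk_zero_iff (r : Int) : DigitsOk 0 r ↔ r = 1 := by
  unfold DigitsOk
  constructor
  · rintro ⟨h0, hb, hd⟩
    have := hd 0 le_rfl
    simp only [pow_zero, Int.ediv_one] at this
    norm_num at hb
    omega
  · rintro rfl
    refine ⟨by norm_num, by norm_num, ?_⟩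
    intro i hi
    interval_cases i
    norm_num

lemma digitsOk_succ_top (k : Nat) (r : Int) (hr : 3 ^ (k+1) < r) :
    DigitsOk k (r - 3 ^ (k+1)) ↔ DigitsOk (k+1) r := by
  have hp : (0:Int) < 3 ^ (k+1) := pow_pos (by norm_num) _
  have hps : (3:Int) ^ (k+2) = 3 * 3 ^ (k+1) := by rw [pow_succ]; ring
  constructor
  · rintro ⟨h0, hb, hd⟩
    have hr' : r = 3 ^ (k+1) + (r - 3 ^ (k+1)) := by ring
    refine ⟨by omega, by omega, ?_⟩
    intro i hi
    rcases Nat.lt_or_ge i (k+1) with hik | hik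
    · rw [hr', topdigit_div k i (by omega)]
      exact hd i (by omega)
    · have hie : i = k + 1 := by omega
      subst hie
      rw [hr', topdigit_top k _ (by omega) (by omega)]
      norm_num
  · rintro ⟨h0, hb, hd⟩
    have hd1 := hd (k+1) le_rfl
    have hq1 : 1 ≤ r / 3 ^ (k+1) := by
      rw [Int.le_ediv_iff_mul_le hp]
      omega
    have hq3 : r / 3 ^ (k+1) < 3 := by
      rw [Int.ediv_lt_iff_lt_mul hp]
      omega
    have hq : r / 3 ^ (k+1) = 1 := by omega
    have hub : r < 2 * 3 ^ (k+1) := by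
      have := Int.lt_ediv_add_one_mul_self r hp
      rw [hq] at this
      omega
    refine ⟨by omega, by omega, ?_⟩
    intro i hi
    have hr' : r = 3 ^ (k+1) + (r - 3 ^ (k+1)) := by ring
    have := hd i (by omega)
    rw [hr', topdigit_div k i hi] at this
    exact this

lemma digitsOk_succ_eq (k : Nat) : DigitsOk (k+1) ((3:Int) ^ (k+1)) := by
  have hp : (0:Int) < 3 ^ (k+1) := pow_pos (by norm_num) _
  have hps : (3:Int) ^ (k+2) = 3 * 3 ^ (k+1) := by rw [pow_succ]; ring
  refine ⟨hp, by omega, ?_⟩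
  intro i hi
  have hzero : ((3:Int) ^ (k+1) + 0) / 3 ^ i % 3 = (3:Int) ^ (k+1) / 3 ^ i % 3 := by norm_num
  rcases Nat.lt_or_ge i (k+1) with hik | hik
  · rw [← hzero, topdigit_div k i (by omega)]
    simp
  · have hie : i = k + 1 := by omega
    subst hie
    rw [← hzero, topdigit_top k 0 le_rfl hp]
    norm_num

lemma digitsOk_succ_lt (k : Nat) (r : Int) (hr : r < 3 ^ (k+1)) :
    DigitsOk k r ↔ DigitsOk (k+1) r := by
  have hp : (0:Int) < 3 ^ (k+1) := pow_pos (by norm_num) _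
  have hps : (3:Int) ^ (k+2) = 3 * 3 ^ (k+1) := by rw [pow_succ]; ring
  constructor
  · rintro ⟨h0, hb, hd⟩
    refine ⟨h0, by omega, ?_⟩
    intro i hi
    rcases Nat.lt_or_ge i (k+1) with hik | hik
    · exact hd i (by omega)
    · have hie : i = k + 1 := by omega
      subst hie
      rw [Int.ediv_eq_zero_of_lt (by omega) hr]
      norm_num
  · rintro ⟨h0, hb, hd⟩
    exact ⟨h0, hr, fun i hi => hd i (by omega)⟩

lemma grRem_iff : ∀ (k : Nat) (r : Int), grRem (k + 1) r = true ↔ DigitsOk k r := by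
  intro k
  induction k with
  | zero =>
    intro r
    show (if (3:Int) ^ 0 < r then grRem 0 (r - 3 ^ 0) else if (3:Int) ^ 0 = r then true else grRem 0 r) = true ↔ _
    rw [digitsOk_zero_iff]
    split_ifs with h1 h2 <;> simp [grRem] <;> omega
  | succ k ih =>
    intro r
    show (if (3:Int) ^ (k+1) < r then grRem (k+1) (r - 3 ^ (k+1))
          else if (3:Int) ^ (k+1) = r then true else grRem (k+1) r) = true ↔ _
    have hp : (0:Int) < 3 ^ (k+1) := pow_pos (by norm_num) _
    split_ifs with h1 h2
    · rw [ih]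
      exact digitsOk_succ_top k r h1
    · subst h2
      simp only [true_iff]
      exact digitsOk_succ_eq k
    · rw [ih]
      exact digitsOk_succ_lt k r (by omega)

lemma altGo_iff : ∀ (k : Nat) (n : Int), 0 ≤ n →
    (checkPowersOfThreeAltGo k n = true ↔ n < 3 ^ k ∧ ∀ i : Nat, i < k → n / 3 ^ i % 3 ≠ 2) := by
  intro k
  induction k with
  | zero =>
    intro n hn
    simp only [checkPowersOfThreeAltGo, beq_iff_eq, pow_zero]
    constructor
    · intro h; exact ⟨by omega, fun i hi => absurd hi (Nat.not_lt_zero i)⟩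
    · rintro ⟨h, -⟩; omega
  | succ k ih =>
    intro n hn
    show (if PySem.Int.mod n 3 == 2 then false else checkPowersOfThreeAltGo k (PySem.Int.floordiv n 3)) = true ↔ _
    rw [PySem.Int.mod_eq_emod_of_pos (by norm_num), PySem.Int.floordiv_eq_ediv_of_pos (by norm_num)]
    have h3 : (0:Int) < 3 := by norm_num
    have hdiv : 0 ≤ n / 3 := Int.ediv_nonneg hn (by norm_num)
    by_cases hm : n % 3 = 2
    · rw [if_pos (by simpa using hm)]
      constructor
      · intro h; exact absurd h (by norm_num)
      · rintro ⟨-, hd⟩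
        exact absurd (by simpa using hm) (hd 0 (by omega))
    · rw [if_neg (by simpa using hm), ih (n / 3) hdiv]
      have hb : n / 3 < 3 ^ k ↔ n < 3 ^ (k+1) := by
        rw [Int.ediv_lt_iff_lt_mul h3, pow_succ]
      have hdig : ∀ i : Nat, n / 3 / 3 ^ i = n / 3 ^ (i+1) := by
        intro i
        rw [Int.ediv_ediv_of_nonneg (by norm_num : (0:Int) ≤ 3), ← pow_succ']
      constructor
      · rintro ⟨hlt, hd⟩
        refine ⟨hb.mp hlt, ?_⟩
        intro i hi
        cases i with
        | zero => simpa using hm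
        | succ j =>
          have := hd j (by omega)
          rw [hdig j] at this
          exact this
      · rintro ⟨hlt, hd⟩
        refine ⟨hb.mpr hlt, ?_⟩
        intro i hi
        rw [hdig i]
        exact hd (i+1) (by omega)

lemma grRem_nonpos : ∀ (k : Nat) (r : Int), r ≤ 0 → grRem k r = false := by
  intro k
  induction k with
  | zero => intro r _; rfl
  | succ k ih =>
    intro r hr
    have hp : (0:Int) < 3 ^ k := pow_pos (by norm_num) _
    show (if (3:Int) ^ k < r then grRem k (r - 3 ^ k)
          else if (3:Int) ^ k = r then true else grRem k r) = false
    rw [if_neg (by omega), if_neg (by omega), ih r hr]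

lemma checkA_nonpos (n : Int) (hn : n ≤ 0) : checkPowersOfThree n = false := by
  unfold checkPowersOfThree
  rw [checkPowersOfThreeGo_eq_grRem]
  exact grRem_nonpos 17 (n - 0) (by omega)

-- ===== VERDICT (by name: the statement is the Claim_ definition above) =====
theorem checkPowersOfThree_spec : Claim_equal_checkPowersOfThree := by
  intro n _
  unfold Spec_checkPowersOfThree checkPowersOfThree_alt
  by_cases hn : n ≤ 0
  · rw [if_pos hn, checkA_nonpos n hn]
  · rw [if_neg hn]
    rw [not_le] at hn
    have hA : checkPowersOfThree n = grRem 17 n := by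
      unfold checkPowersOfThree
      rw [checkPowersOfThreeGo_eq_grRem]; norm_num
    have h1 := grRem_iff 16 n
    have h2 := altGo_iff 17 n (le_of_lt hn)
    rw [hA]
    cases hg : grRem 17 n <;> cases hb : checkPowersOfThreeAltGo 17 n <;> try rfl
    · rw [hb] at h2
      have ⟨hlt, hdig⟩ := h2.mp rfl
      rw [hg] at h1
      exfalso
      have : DigitsOk 16 n := ⟨hn, by norm_num at hlt ⊢; exact hlt,
        fun i hi => hdig i (by omega)⟩
      simpa using h1.mpr this
    · rw [hg] at h1
      have ⟨_, hlt, hdig⟩ := h1.mp rfl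
      rw [hb] at h2
      exfalso
      have : n < 3 ^ 17 ∧ ∀ i : Nat, i < 17 → n / 3 ^ i % 3 ≠ 2 :=
        ⟨by norm_num at hlt ⊢; exact hlt, fun i hi => hdig i (by omega)⟩
      simpa using h2.mpr this
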